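-- pv_equiv track=rewrite | github.com/hghyhghy/Codechef-Coding-Ninja | T46/5.py | count_twin_pairs
-- ===== SOURCE A (Python) =====
-- def count_twin_pairs(array):
--
--     count = 0
--     n=len(array)
--
--     for i in range(n):
--         for j in range(i+1,n):
--
--             if (array[j]-array[i]) == (j-i):
--
--                 count += 1
--
--     return count
-- ===== SOURCE B (Python) =====
-- def count_twin_pairs(array):
--     counts = {}
--     for i, v in enumerate(array):
--         key = v - i
--         counts[key] = counts.get(key, 0) + 1
--     total = 0
--     for c in counts.values():
--         total += c * (c - 1) // 2
--     return total
-- ===== Notes on version B (the rewrite author's own statement) =====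
-- stated objective: faster
-- what changed: Replaced the O(n^2) scan over all index pairs by a single pass that groups indices by the key array[i]-i in a dict and sums c*(c-1)//2 over the group sizes.
import Mathlib
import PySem

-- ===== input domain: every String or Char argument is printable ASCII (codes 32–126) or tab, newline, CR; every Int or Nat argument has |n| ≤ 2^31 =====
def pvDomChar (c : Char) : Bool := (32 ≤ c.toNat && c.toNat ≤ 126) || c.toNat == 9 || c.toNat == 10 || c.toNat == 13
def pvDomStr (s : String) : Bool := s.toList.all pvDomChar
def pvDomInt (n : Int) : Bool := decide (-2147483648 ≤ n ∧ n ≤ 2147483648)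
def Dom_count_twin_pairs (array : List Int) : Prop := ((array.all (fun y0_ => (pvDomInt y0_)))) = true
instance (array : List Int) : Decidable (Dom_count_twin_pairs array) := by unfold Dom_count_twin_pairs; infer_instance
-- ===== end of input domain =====

-- B replaces A's O(n^2) double loop over index pairs by a single pass that counts
-- each key array[i]-i in a dict and sums c*(c-1)//2 over the group sizes (faster: asymptotic).

-- ===== PORT A =====
def count_twin_pairs (array : List Int) : Int :=
  let n : Int := array.length
  (PySem.List.pyRange 0 n 1).foldl (fun count i =>
    (PySem.List.pyRange (i + 1) n 1).foldl (fun count j =>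
      if PySem.List.pyGetD array j 0 - PySem.List.pyGetD array i 0 = j - i
      then count + 1 else count) count) 0

-- ===== PORT B =====
def count_twin_pairs_alt (array : List Int) : Int :=
  let counts : PySem.Dict Int Int :=
    (PySem.List.enumerate array).foldl
      (fun d p => d.insert (p.2 - p.1) (d.getD (p.2 - p.1) 0 + 1)) PySem.Dict.empty
  counts.values.foldl (fun total c => total + PySem.Int.floordiv (c * (c - 1)) 2) 0

-- ===== PRECONDITION & SPEC =====
def Spec_count_twin_pairs (array : List Int) (out : Int) : Prop := out = count_twin_pairs_alt array
instance (array : List Int) (out : Int) : Decidable (Spec_count_twin_pairs array out) := by unfold Spec_count_twin_pairs; infer_instance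

-- ===== CLAIM (what is proved, stated in full; the proofs are below) =====
def Claim_equal_count_twin_pairs : Prop := ∀ (array : List Int), Dom_count_twin_pairs array → Spec_count_twin_pairs array (count_twin_pairs array)

-- ===== LEMMAS AND PROOFS =====

def pvKeys (array : List Int) : List Int :=
  (PySem.List.enumerate array).map (fun p => p.2 - p.1)

def pvPairCount : List Int → Nat
  | [] => 0
  | x :: t => t.count x + pvPairCount t

lemma pvKeys_length (l : List Int) : (pvKeys l).length = l.length := by
  simp [pvKeys, PySem.List.length_enumerate]

lemma pvKeys_getElem? (l : List Int) (k : Nat) :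
    (pvKeys l)[k]? = l[k]?.map (fun x => x - (k : Int)) := by
  simp [pvKeys, PySem.List.getElem?_enumerate, Option.map_map, Function.comp_def]

-- countP over indices = count  (generic)
lemma countP_range_getD (l : List Int) (v : Int) :
    (List.range l.length).countP (fun t => decide (l.getD t 0 = v)) = l.count v := by
  induction l with
  | nil => simp
  | cons x t ih =>
    simp only [List.length_cons, List.range_succ_eq_map, List.countP_cons, List.countP_map]
    simp only [List.getD_cons_zero, List.getD_cons_succ, Function.comp_def, Nat.succ_eq_add_one]
    rw [ih, List.count_cons]
    by_cases h : x = v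
    · simp [h]
    · simp [h, beq_iff_eq]

lemma countP_pyRange_pyGetD (l : List Int) (a : Int) (v : Int) (ha : 0 ≤ a) :
    (PySem.List.pyRange a (l.length : Int) 1).countP
      (fun j => decide (PySem.List.pyGetD l j 0 = v)) = (l.drop a.toNat).count v := by
  rw [PySem.List.pyRange_one, List.countP_map]
  have hlen : ((l.length : Int) - a).toNat = (l.drop a.toNat).length := by
    simp [List.length_drop]; omega
  rw [hlen, ← countP_range_getD (l.drop a.toNat) v]
  apply List.countP_congr
  intro k hk
  simp only [List.mem_range] at hk
  simp only [Function.comp_def, decide_eq_true_eq]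
  have h1 : PySem.List.pyGetD l (a + (k : Int)) 0 = l.getD (a + (k : Int)).toNat 0 :=
    PySem.List.pyGetD_of_nonneg l 0 (by omega)
  have h2 : (a + (k : Int)).toNat = a.toNat + k := by omega
  have h3 : (l.drop a.toNat).getD k 0 = l.getD (a.toNat + k) 0 := by
    simp [List.getD_eq_getElem?_getD, List.getElem?_drop]
  rw [h1, h2, h3]

lemma pvKeys_pyGetD (l : List Int) (j : Int) (h0 : 0 ≤ j) (hlt : j < l.length) :
    PySem.List.pyGetD (pvKeys l) j 0 = PySem.List.pyGetD l j 0 - j := by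
  rw [PySem.List.pyGetD_of_nonneg _ _ h0, PySem.List.pyGetD_of_nonneg _ _ h0]
  have hj : j.toNat < l.length := by omega
  simp [List.getD_eq_getElem?_getD, pvKeys_getElem?, List.getElem?_eq_getElem hj]
  omega

-- A's inner loop count, re-read on the key list
lemma inner_count (l : List Int) (k : Nat) (hk : k < l.length) :
    (PySem.List.pyRange ((k : Int) + 1) (l.length : Int) 1).countP
      (fun j => decide (PySem.List.pyGetD l j 0 - PySem.List.pyGetD l (k : Int) 0 = j - (k : Int)))
      = ((pvKeys l).drop (k + 1)).count ((pvKeys l).getD k 0) := by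
  have hlen : ((pvKeys l).length : Int) = (l.length : Int) := by rw [pvKeys_length]
  have hv : (pvKeys l).getD k 0 = PySem.List.pyGetD l (k : Int) 0 - (k : Int) := by
    have := pvKeys_pyGetD l (k : Int) (by omega) (by omega)
    rwa [PySem.List.pyGetD_of_nonneg _ _ (by omega), Int.toNat_natCast] at this
  have hstep : ∀ j ∈ PySem.List.pyRange ((k : Int) + 1) (l.length : Int) 1,
      (decide (PySem.List.pyGetD l j 0 - PySem.List.pyGetD l (k : Int) 0 = j - (k : Int)))
        = (decide (PySem.List.pyGetD (pvKeys l) j 0 = (pvKeys l).getD k 0)) := by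
    intro j hj
    rw [PySem.List.mem_pyRange_one] at hj
    rw [pvKeys_pyGetD l j (by omega) (by omega), hv]
    simp only [decide_eq_decide]
    omega
  rw [List.countP_congr (fun x hx => by rw [hstep x hx]),
      ← hlen, countP_pyRange_pyGetD (pvKeys l) ((k : Int) + 1) _ (by omega)]
  congr 1

-- index-sum form of the pair count
lemma sum_dropCount (l : List Int) :
    ((List.range l.length).map (fun k => ((l.drop (k + 1)).count (l.getD k 0)))).sum
      = pvPairCount l := by
  induction l with
  | nil => simp [pvPairCount]
  | cons x t ih =>
    simp only [List.length_cons, List.range_succ_eq_map, List.map_cons, List.map_map,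
      List.sum_cons, pvPairCount]
    rw [show ((fun k => ((x :: t).drop (k + 1)).count ((x :: t).getD k 0)) ∘ Nat.succ)
        = (fun k => ((t.drop (k + 1)).count (t.getD k 0))) by
      funext m; simp]
    have h0 : ((x :: t).drop (0 + 1)).count ((x :: t).getD 0 0) = t.count x := by simp
    rw [h0, ih]

lemma choose_two_succ (n : Nat) : (n + 1).choose 2 = n.choose 2 + n := by
  simp [Nat.choose_succ_succ, Nat.choose_one_right]
  omega

-- grouped form of the pair count
lemma finset_pairCount (l : List Int) :
    ∑ k ∈ l.toFinset, (l.count k).choose 2 = pvPairCount l := by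
  induction l with
  | nil => simp [pvPairCount]
  | cons x t ih =>
    simp only [List.toFinset_cons, pvPairCount]
    by_cases hx : x ∈ t
    · rw [Finset.insert_eq_self.mpr (List.mem_toFinset.mpr hx)]
      rw [← ih]
      have hxm : x ∈ t.toFinset := List.mem_toFinset.mpr hx
      rw [← Finset.add_sum_erase _ _ hxm, ← Finset.add_sum_erase _ (fun k => (t.count k).choose 2) hxm]
      have h1 : ((x :: t).count x).choose 2 = (t.count x).choose 2 + t.count x := by
        rw [List.count_cons_self, choose_two_succ]
      have h2 : ∀ k ∈ t.toFinset.erase x, ((x :: t).count k).choose 2 = (t.count k).choose 2 := by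
        intro k hk
        have : k ≠ x := (Finset.mem_erase.mp hk).1
        rw [List.count_cons_of_ne (Ne.symm this)]
      rw [Finset.sum_congr rfl h2, h1]
      omega
    · have hxm : x ∉ t.toFinset := fun h => hx (List.mem_toFinset.mp h)
      rw [Finset.sum_insert hxm, List.count_cons_self]
      have h0 : t.count x = 0 := List.count_eq_zero.mpr hx
      rw [h0]
      have h2 : ∀ k ∈ t.toFinset, ((x :: t).count k).choose 2 = (t.count k).choose 2 := by
        intro k hk
        have : k ≠ x := fun he => hxm (he ▸ hk)
        rw [List.count_cons_of_ne (Ne.symm this)]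
      rw [Finset.sum_congr rfl h2, ih]
      simp

-- c*(c-1)//2 is choose 2
lemma floordiv_choose_two (n : Nat) :
    PySem.Int.floordiv ((n : Int) * ((n : Int) - 1)) 2 = ((n.choose 2 : Nat) : Int) := by
  rw [PySem.Int.floordiv_eq_ediv_of_pos (by norm_num)]
  induction n with
  | zero => decide
  | succ m ih =>
    have hch : (m + 1).choose 2 = m.choose 2 + m := choose_two_succ m
    have hprod : ((m : Int) + 1) * ((m : Int) + 1 - 1) = (m : Int) * ((m : Int) - 1) + 2 * m := by
      ring
    push_cast [hch, hprod]
    push_cast at ih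
    omega

lemma sum_map_natCast {α : Type} (S : List α) (g : α → Nat) :
    (S.map (fun k => ((g k : Nat) : Int))).sum = (((S.map g).sum : Nat) : Int) := by
  rw [Nat.cast_list_sum, List.map_map]
  simp [Function.comp_def]

lemma portA_eq (array : List Int) :
    count_twin_pairs array = ((pvPairCount (pvKeys array) : Nat) : Int) := by
  unfold count_twin_pairs
  rw [PySem.List.foldl_congr_mem (g := fun (count : Int) (i : Int) =>
      count + ((PySem.List.pyRange (i + 1) (array.length : Int) 1).countP
        (fun j => decide (PySem.List.pyGetD array j 0 - PySem.List.pyGetD array i 0 = j - i)) : Int))]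
  · rw [PySem.List.foldl_add, PySem.List.pyRange_zero_natCast, List.map_map, zero_add]
    rw [List.map_congr_left (g := fun (k : Nat) =>
        ((((pvKeys array).drop (k + 1)).count ((pvKeys array).getD k 0) : Nat) : Int)) ?_]
    · rw [sum_map_natCast, ← pvKeys_length array, sum_dropCount]
    · intro k hk
      simp only [List.mem_range] at hk
      simp only [Function.comp_def]
      rw [inner_count array k hk]
  · intro acc x hx
    rw [PySem.List.foldl_ite_add_one
      (p := fun j => PySem.List.pyGetD array j 0 - PySem.List.pyGetD array x 0 = j - x)]

lemma portB_eq (array : List Int) :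
    count_twin_pairs_alt array = ((pvPairCount (pvKeys array) : Nat) : Int) := by
  unfold count_twin_pairs_alt
  have hc : (PySem.List.enumerate array).foldl
      (fun d p => d.insert (p.2 - p.1) (d.getD (p.2 - p.1) 0 + 1)) PySem.Dict.empty
      = PySem.Dict.counter (pvKeys array) := by
    rw [pvKeys, ← PySem.Dict.foldl_insert_getD_add_one_eq_counter, List.foldl_map]
  simp only [hc]
  rw [PySem.List.foldl_add, zero_add]
  have hvals : (PySem.Dict.counter (pvKeys array)).values
      = (PySem.Set.ofList (pvKeys array)).map (fun k => ((pvKeys array).count k : Int)) := by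
    simp only [PySem.Dict.values, PySem.Dict.items_counter, List.map_map]
    rfl
  rw [hvals, List.map_map]
  rw [List.map_congr_left (g := fun k =>
      ((((pvKeys array).count k).choose 2 : Nat) : Int)) ?_]
  · rw [sum_map_natCast]
    congr 1
    rw [← List.sum_toFinset _ (PySem.Set.nodup_ofList (pvKeys array))]
    have hfs : (PySem.Set.ofList (pvKeys array)).toFinset = (pvKeys array).toFinset := by
      apply Finset.ext
      intro a
      simp [List.mem_toFinset, PySem.Set.mem_ofList]
    rw [hfs, finset_pairCount]
  · intro k hk
    simp only [Function.comp_def]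
    rw [floordiv_choose_two]

-- ===== VERDICT (by name: the statement is the Claim_ definition above) =====
theorem count_twin_pairs_spec : Claim_equal_count_twin_pairs := by
  intro array _
  unfold Spec_count_twin_pairs
  rw [portA_eq, portB_eq]
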